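-- pv_equiv track=rewrite | github.com/guramiivanidze/speldo | backend/competitive/elo.py | get_rating_to_next_division
-- ===== SOURCE A (Python) =====
-- DIVISION_THRESHOLDS = {
--     'Grandmaster': 2000,
--     'Master': 1800,
--     'Diamond': 1600,
--     'Platinum': 1400,
--     'Gold': 1200,
--     'Silver': 1000,
--     'Bronze': 0,
-- }
--
-- def get_division(rating: int) -> str:
--     """Get division name for a given rating."""
--     for division, threshold in DIVISION_THRESHOLDS.items():
--         if rating >= threshold:
--             return division
--     return 'Bronze'
--
-- def get_rating_to_next_division(rating: int) -> tuple[str, int]: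
--     """
--     Get the next division and points needed to reach it.
--
--     Returns:
--         Tuple of (next_division, points_needed) or (None, 0) if at max
--     """
--     current_division = get_division(rating)
--
--     # Find next division
--     divisions = list(DIVISION_THRESHOLDS.items())
--     for i, (division, threshold) in enumerate(divisions):
--         if division == current_division:
--             if i == 0:
--                 # Already at Grandmaster
--                 return None, 0
--             next_division = divisions[i - 1][0]
--             next_threshold = divisions[i - 1][1]
--             return next_division, next_threshold - rating
--
--     return None, 0
-- ===== SOURCE B (Python) =====
-- def get_rating_to_next_division(rating: int) -> tuple[str, int]:
--     # Table-free decision chain: compare rating against the fixed cut-offs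
--     # directly and return the next division in closed form (no table, no scan).
--     if rating >= 2000:
--         return None, 0
--     if rating >= 1800:
--         return 'Grandmaster', 2000 - rating
--     if rating >= 1600:
--         return 'Master', 1800 - rating
--     if rating >= 1400:
--         return 'Diamond', 1600 - rating
--     if rating >= 1200:
--         return 'Platinum', 1400 - rating
--     if rating >= 1000:
--         return 'Gold', 1200 - rating
--     return 'Silver', 1000 - rating
-- ===== Notes on version B (the rewrite author's own statement) =====
-- stated objective: simpler
-- what changed: Replaces A's two table scans (a dict scan to name the current division, then an enumerate search over the same dict for that name to step one slot up) with a table-free early-return comparison chain that maps the rating straight to the next division and points gap in closed form.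
import Mathlib
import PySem

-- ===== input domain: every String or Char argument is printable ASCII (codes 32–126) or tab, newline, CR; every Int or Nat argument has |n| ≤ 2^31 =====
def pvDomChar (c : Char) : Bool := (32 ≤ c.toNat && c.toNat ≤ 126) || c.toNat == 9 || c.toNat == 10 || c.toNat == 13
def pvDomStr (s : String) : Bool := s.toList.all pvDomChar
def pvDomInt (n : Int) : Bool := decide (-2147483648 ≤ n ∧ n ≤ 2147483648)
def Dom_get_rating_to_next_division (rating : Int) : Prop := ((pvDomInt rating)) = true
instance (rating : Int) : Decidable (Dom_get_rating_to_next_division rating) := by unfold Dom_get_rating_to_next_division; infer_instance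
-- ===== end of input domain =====

-- B replaces A's two table scans with a table-free early-return comparison chain (simpler).

-- ===== PORT A =====
-- DIVISION_THRESHOLDS in insertion (descending) order
def divisionThresholds : List (String × Int) :=
  [("Grandmaster", 2000), ("Master", 1800), ("Diamond", 1600), ("Platinum", 1400),
   ("Gold", 1200), ("Silver", 1000), ("Bronze", 0)]

-- the loop of get_division: first name whose threshold <= rating, else 'Bronze'
def getDivisionLoop (rating : Int) : List (String × Int) → String
  | [] => "Bronze"
  | (division, threshold) :: rest =>
    if rating ≥ threshold then division else getDivisionLoop rating rest

def get_division (rating : Int) : String := getDivisionLoop rating divisionThresholds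

-- the enumerate loop: find current_division's index i, then divisions[i-1]
def findNextLoop (divisions : List (String × Int)) (currentDivision : String) (rating : Int) :
    List (Int × String × Int) → Option String × Int
  | [] => (none, 0)
  | (i, division, _threshold) :: rest =>
    if division == currentDivision then
      if i == 0 then (none, 0)
      else
        match PySem.List.pyGet? divisions (i - 1) with
        | some (nextDivision, nextThreshold) => (some nextDivision, nextThreshold - rating)
        | none => (none, 0)   -- unreachable: i - 1 is always in range
    else findNextLoop divisions currentDivision rating rest

def get_rating_to_next_division (rating : Int) : Option String × Int :=
  let currentDivision := get_division rating
  let divisions := divisionThresholds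
  findNextLoop divisions currentDivision rating (PySem.List.enumerate divisions)

-- ===== PORT B =====
def get_rating_to_next_division_alt (rating : Int) : Option String × Int :=
  if rating ≥ 2000 then (none, 0)
  else if rating ≥ 1800 then (some "Grandmaster", 2000 - rating)
  else if rating ≥ 1600 then (some "Master", 1800 - rating)
  else if rating ≥ 1400 then (some "Diamond", 1600 - rating)
  else if rating ≥ 1200 then (some "Platinum", 1400 - rating)
  else if rating ≥ 1000 then (some "Gold", 1200 - rating)
  else (some "Silver", 1000 - rating)

-- ===== PRECONDITION & SPEC =====
def Spec_get_rating_to_next_division (rating : Int) (out : Option String × Int) : Prop := out = get_rating_to_next_division_alt rating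
instance (rating : Int) (out : Option String × Int) : Decidable (Spec_get_rating_to_next_division rating out) := by unfold Spec_get_rating_to_next_division; infer_instance

-- ===== CLAIM =====
def Claim_equal_get_rating_to_next_division : Prop := ∀ (rating : Int), Dom_get_rating_to_next_division rating → Spec_get_rating_to_next_division rating (get_rating_to_next_division rating)

-- ===== LEMMAS AND PROOFS =====

-- ===== VERDICT =====
theorem get_rating_to_next_division_spec : Claim_equal_get_rating_to_next_division := by
  intro rating _
  unfold Spec_get_rating_to_next_division get_rating_to_next_division get_rating_to_next_division_alt
    get_division divisionThresholds
  rcases lt_or_ge rating 1000 with h1 | h1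
  · simp [getDivisionLoop, findNextLoop, PySem.List.enumerate, PySem.List.pyGet?, PySem.List.pyIdx?,
        show ¬ ((1000:Int) ≤ rating) from by omega,
        show ¬ ((1200:Int) ≤ rating) from by omega,
        show ¬ ((1400:Int) ≤ rating) from by omega,
        show ¬ ((1600:Int) ≤ rating) from by omega,
        show ¬ ((1800:Int) ≤ rating) from by omega,
        show ¬ ((2000:Int) ≤ rating) from by omega]
  · rcases lt_or_ge rating 1200 with h2 | h2
    · simp [getDivisionLoop, findNextLoop, PySem.List.enumerate, PySem.List.pyGet?, PySem.List.pyIdx?,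
          show (1000:Int) ≤ rating from by omega,
          show ¬ ((1200:Int) ≤ rating) from by omega,
          show ¬ ((1400:Int) ≤ rating) from by omega,
          show ¬ ((1600:Int) ≤ rating) from by omega,
          show ¬ ((1800:Int) ≤ rating) from by omega,
          show ¬ ((2000:Int) ≤ rating) from by omega]
    · rcases lt_or_ge rating 1400 with h3 | h3
      · simp [getDivisionLoop, findNextLoop, PySem.List.enumerate, PySem.List.pyGet?, PySem.List.pyIdx?,
            show (1200:Int) ≤ rating from by omega,
            show ¬ ((1400:Int) ≤ rating) from by omega,
            show ¬ ((1600:Int) ≤ rating) from by omega,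
            show ¬ ((1800:Int) ≤ rating) from by omega,
            show ¬ ((2000:Int) ≤ rating) from by omega]
      · rcases lt_or_ge rating 1600 with h4 | h4
        · simp [getDivisionLoop, findNextLoop, PySem.List.enumerate, PySem.List.pyGet?, PySem.List.pyIdx?,
              show (1400:Int) ≤ rating from by omega,
              show ¬ ((1600:Int) ≤ rating) from by omega,
              show ¬ ((1800:Int) ≤ rating) from by omega,
              show ¬ ((2000:Int) ≤ rating) from by omega]
        · rcases lt_or_ge rating 1800 with h5 | h5
          · simp [getDivisionLoop, findNextLoop, PySem.List.enumerate, PySem.List.pyGet?, PySem.List.pyIdx?,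
                show (1600:Int) ≤ rating from by omega,
                show ¬ ((1800:Int) ≤ rating) from by omega,
                show ¬ ((2000:Int) ≤ rating) from by omega]
          · rcases lt_or_ge rating 2000 with h6 | h6
            · simp [getDivisionLoop, findNextLoop, PySem.List.enumerate, PySem.List.pyGet?, PySem.List.pyIdx?,
                  show (1800:Int) ≤ rating from by omega,
                  show ¬ ((2000:Int) ≤ rating) from by omega]
            · simp [getDivisionLoop, findNextLoop, PySem.List.enumerate, PySem.List.pyGet?, PySem.List.pyIdx?,
                  show (2000:Int) ≤ rating from by omega]
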